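-- pv_equiv track=rewrite | github.com/cooperalex97/BIOINFORMATICA_UNSA | Practica_08/Codigo/blast_multi.py | Encontrar_Pares_HSSP
-- ===== SOURCE A (Python) =====
-- def Busqueda_Binaria_Secuencia(palabra, div_inicial_matriz_db, izquierdo, derecho):
-- 	if derecho >= izquierdo: # Caso base
--
-- 		mid = izquierdo + (derecho - izquierdo) // 2
--
-- 		if div_inicial_matriz_db[mid][0] == palabra[0]:
-- 			return div_inicial_matriz_db[mid][1]
--
-- 		elif div_inicial_matriz_db[mid][0] > palabra[0]:
-- 			return Busqueda_Binaria_Secuencia(palabra, div_inicial_matriz_db, izquierdo, mid-1)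
-- 		else:
-- 			return Busqueda_Binaria_Secuencia(palabra, div_inicial_matriz_db, mid+1, derecho)
-- 	else:
-- 		return []
--
-- def Encontrar_Pares_HSSP( fragmento_inicial_matriz_query, div_inicial_matriz_db):
-- 	lista_pares_hssp = []
-- 	for palabra in fragmento_inicial_matriz_query:
-- 		matching_posiciones_iniciales = Busqueda_Binaria_Secuencia(palabra, div_inicial_matriz_db, 0, len(div_inicial_matriz_db)-1)
--
-- 		if(matching_posiciones_iniciales != []):
-- 			for i in matching_posiciones_iniciales:
-- 				lista_pares_hssp.append([palabra[1], i])
-- 	return lista_pares_hssp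
-- ===== SOURCE B (Python) =====
-- def Encontrar_Pares_HSSP(fragmento_inicial_matriz_query, div_inicial_matriz_db):
-- 	def busca(clave, xs):
-- 		# divide-and-conquer on the list itself: probe the middle element
-- 		# ((len-1)//2, the same element A's index arithmetic probes), then
-- 		# recurse on the left or right slice
-- 		if not xs:
-- 			return []
-- 		m = (len(xs) - 1) // 2
-- 		k, v = xs[m]
-- 		if k == clave:
-- 			return v
-- 		if k > clave:
-- 			return busca(clave, xs[:m])
-- 		return busca(clave, xs[m + 1:])
-- 	return [[pos, i]
-- 		for (palabra, pos) in fragmento_inicial_matriz_query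
-- 		for i in busca(palabra, div_inicial_matriz_db)]
-- ===== Notes on version B (the rewrite author's own statement) =====
-- stated objective: alternative
-- what changed: The index-bound recursive binary search becomes a divide-and-conquer recursion on the list itself (probe the middle element, recurse on the left or right slice), and the accumulate-and-append outer loop with its redundant empty-check becomes a single flattening list comprehension.
import Mathlib
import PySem

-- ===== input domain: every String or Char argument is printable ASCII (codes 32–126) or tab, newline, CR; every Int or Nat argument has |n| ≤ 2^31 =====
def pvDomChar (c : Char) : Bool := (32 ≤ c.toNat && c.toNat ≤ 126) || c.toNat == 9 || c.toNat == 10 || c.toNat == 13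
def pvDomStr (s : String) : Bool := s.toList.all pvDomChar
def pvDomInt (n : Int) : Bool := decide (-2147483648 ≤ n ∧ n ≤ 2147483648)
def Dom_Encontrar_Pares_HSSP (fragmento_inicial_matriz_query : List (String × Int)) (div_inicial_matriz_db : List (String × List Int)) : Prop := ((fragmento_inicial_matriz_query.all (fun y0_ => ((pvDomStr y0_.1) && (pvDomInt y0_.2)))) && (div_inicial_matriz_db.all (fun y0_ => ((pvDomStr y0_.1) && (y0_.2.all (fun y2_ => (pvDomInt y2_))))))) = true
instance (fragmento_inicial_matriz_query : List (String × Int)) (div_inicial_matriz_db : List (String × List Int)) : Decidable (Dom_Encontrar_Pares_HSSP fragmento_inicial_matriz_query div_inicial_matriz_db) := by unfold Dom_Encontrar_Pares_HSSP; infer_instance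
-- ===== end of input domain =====

-- B replaces A's index-bound recursive binary search by a divide-and-conquer recursion on the
-- list itself (probe the middle, recurse on a slice) and A's accumulate-and-append outer loop
-- by a flattening comprehension; alternative decomposition, same results.

-- ===== PORT A =====
-- A's recursive binary search, step for step.  The extra Nat argument is only a totality
-- guard (an upper bound on the recursion depth; (derecho - izquierdo + 1).toNat strictly
-- decreases at every recursive call, so the 0 case is never reached from the wrapper below).
-- On an index out of range Python would raise IndexError; pyGet? returns none there and the
-- port returns [] — unreachable from Encontrar_Pares_HSSP's calls (0 ≤ mid < len throughout).
def Busqueda_Binaria_Secuencia_go (palabra : String × Int) (div_inicial_matriz_db : List (String × List Int)) : Nat → Int → Int → List Int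
  | 0, _, _ => []
  | fuel + 1, izquierdo, derecho =>
    if derecho ≥ izquierdo then
      match PySem.List.pyGet? div_inicial_matriz_db (izquierdo + PySem.Int.floordiv (derecho - izquierdo) 2) with
      | none => []
      | some entrada =>
        if entrada.1 = palabra.1 then entrada.2
        else if PySem.Chars.strLt palabra.1.toList entrada.1.toList then
          Busqueda_Binaria_Secuencia_go palabra div_inicial_matriz_db fuel izquierdo (izquierdo + PySem.Int.floordiv (derecho - izquierdo) 2 - 1)
        else
          Busqueda_Binaria_Secuencia_go palabra div_inicial_matriz_db fuel (izquierdo + PySem.Int.floordiv (derecho - izquierdo) 2 + 1) derecho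
    else []

def Busqueda_Binaria_Secuencia (palabra : String × Int) (div_inicial_matriz_db : List (String × List Int)) (izquierdo derecho : Int) : List Int :=
  Busqueda_Binaria_Secuencia_go palabra div_inicial_matriz_db (derecho - izquierdo + 1).toNat izquierdo derecho

def Encontrar_Pares_HSSP (fragmento_inicial_matriz_query : List (String × Int)) (div_inicial_matriz_db : List (String × List Int)) : List (List Int) :=
  fragmento_inicial_matriz_query.foldl
    (fun lista_pares_hssp palabra =>
      let matching_posiciones_iniciales :=
        Busqueda_Binaria_Secuencia palabra div_inicial_matriz_db 0 ((div_inicial_matriz_db.length : Int) - 1)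
      if matching_posiciones_iniciales ≠ [] then
        matching_posiciones_iniciales.foldl (fun acc i => acc ++ [[palabra.2, i]]) lista_pares_hssp
      else lista_pares_hssp)
    []

-- ===== PORT B =====
-- Source B's `busca`: structural divide-and-conquer on the list — probe the middle element
-- ((len-1)/2), then recurse on the left slice xs[:m] or the right slice xs[m+1:].
-- Python's xs[m] is always in range here (m < len xs); getD with the head as default is exact.
def pvBusca (clave : String) : List (String × List Int) → List Int
  | [] => []
  | x :: rest =>
    let m := rest.length / 2
    let e := (x :: rest).getD m x
    if e.1 = clave then e.2
    else if PySem.Chars.strLt clave.toList e.1.toList then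
      pvBusca clave ((x :: rest).take m)
    else
      pvBusca clave ((x :: rest).drop (m + 1))
termination_by xs => xs.length
decreasing_by
  · simp only [List.length_take, List.length_cons]; omega
  · simp only [List.length_drop, List.length_cons]; omega

def Encontrar_Pares_HSSP_alt (fragmento_inicial_matriz_query : List (String × Int)) (div_inicial_matriz_db : List (String × List Int)) : List (List Int) :=
  fragmento_inicial_matriz_query.flatMap
    (fun p => (pvBusca p.1 div_inicial_matriz_db).map (fun i => [p.2, i]))

-- ===== PRECONDITION & SPEC =====
def Spec_Encontrar_Pares_HSSP (fragmento_inicial_matriz_query : List (String × Int)) (div_inicial_matriz_db : List (String × List Int)) (out : List (List Int)) : Prop := out = Encontrar_Pares_HSSP_alt fragmento_inicial_matriz_query div_inicial_matriz_db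
instance (fragmento_inicial_matriz_query : List (String × Int)) (div_inicial_matriz_db : List (String × List Int)) (out : List (List Int)) : Decidable (Spec_Encontrar_Pares_HSSP fragmento_inicial_matriz_query div_inicial_matriz_db out) := by unfold Spec_Encontrar_Pares_HSSP; infer_instance

-- ===== CLAIM (what is proved, stated in full; the proofs are below) =====
def Claim_equal_Encontrar_Pares_HSSP : Prop := ∀ (fragmento_inicial_matriz_query : List (String × Int)) (div_inicial_matriz_db : List (String × List Int)), Dom_Encontrar_Pares_HSSP fragmento_inicial_matriz_query div_inicial_matriz_db → Spec_Encontrar_Pares_HSSP fragmento_inicial_matriz_query div_inicial_matriz_db (Encontrar_Pares_HSSP fragmento_inicial_matriz_query div_inicial_matriz_db)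

-- ===== LEMMAS AND PROOFS =====

-- A's index-bound search over db on the interval [izq, der] equals B's slice search on the
-- sublist db[izq..der], provided the interval is in range and the fuel covers its length.
theorem go_eq_busca (palabra : String × Int) (db : List (String × List Int)) :
    ∀ (fuel : Nat) (izq der : Int), 0 ≤ izq → der < db.length →
      (der + 1 - izq).toNat ≤ fuel →
      Busqueda_Binaria_Secuencia_go palabra db fuel izq der
        = pvBusca palabra.1 ((db.drop izq.toNat).take (der + 1 - izq).toNat) := by
  intro fuel
  induction fuel with
  | zero =>
    intro izq der h0 hlt hf
    have hn0 : (der + 1 - izq).toNat = 0 := by omega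
    rw [hn0]
    simp [Busqueda_Binaria_Secuencia_go, pvBusca]
  | succ f ih =>
    intro izq der h0 hlt hf
    by_cases hge : der ≥ izq
    · have hn1 : 1 ≤ (der + 1 - izq).toNat := by omega
      set i := izq.toNat with hi
      set n := (der + 1 - izq).toNat with hn
      have hin : i + n ≤ db.length := by omega
      have hslen : ((db.drop i).take n).length = n := by
        simp only [List.length_take, List.length_drop]; omega
      cases hs : (db.drop i).take n with
      | nil => rw [hs] at hslen; simp at hslen; omega
      | cons x rest =>
        have hrest : rest.length = n - 1 := by
          rw [hs] at hslen; simp at hslen; omega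
        have hmid : izq + PySem.Int.floordiv (der - izq) 2 = ((i + (n - 1) / 2 : Nat) : Int) := by
          rw [PySem.Int.floordiv_eq_ediv_of_pos (by omega)]
          push_cast; omega
        have hidx : i + (n - 1) / 2 < db.length := by omega
        have hget : PySem.List.pyGet? db (izq + PySem.Int.floordiv (der - izq) 2)
            = some db[i + (n - 1) / 2] := by
          rw [hmid, PySem.List.pyGet?_natCast]
          exact List.getElem?_eq_getElem hidx
        have he : (x :: rest).getD ((n - 1) / 2) x = db[i + (n - 1) / 2] := by
          have hlt2 : (n - 1) / 2 < (x :: rest).length := by simp [hrest]; omega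
          rw [List.getD_eq_getElem _ _ hlt2]
          have : ((db.drop i).take n)[(n - 1) / 2]'(by rw [hslen]; omega) = db[i + (n - 1) / 2] := by
            rw [List.getElem_take, List.getElem_drop]
          rw [← this]
          congr 1
          exact hs.symm
        rw [Busqueda_Binaria_Secuencia_go, if_pos hge, hget, pvBusca]
        simp only [he, hrest]
        by_cases h1 : db[i + (n - 1) / 2].1 = palabra.1
        · rw [if_pos h1, if_pos h1]
        · rw [if_neg h1, if_neg h1]
          by_cases h2 : PySem.Chars.strLt palabra.1.toList db[i + (n - 1) / 2].1.toList = true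
          · rw [if_pos h2, if_pos h2]
            rw [ih izq (izq + PySem.Int.floordiv (der - izq) 2 - 1) h0 (by rw [hmid]; omega)
              (by rw [hmid]; omega)]
            congr 1
            have h3 : (izq + PySem.Int.floordiv (der - izq) 2 - 1 + 1 - izq).toNat = (n - 1) / 2 := by
              rw [hmid]; omega
            rw [h3, ← hs, List.take_take]
            congr 1
            omega
          · rw [if_neg h2, if_neg h2]
            rw [ih (izq + PySem.Int.floordiv (der - izq) 2 + 1) der (by rw [hmid]; omega) hlt
              (by rw [hmid]; omega)]
            congr 1
            have h3 : (der + 1 - (izq + PySem.Int.floordiv (der - izq) 2 + 1)).toNat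
                = n - 1 - (n - 1) / 2 := by rw [hmid]; omega
            have h4 : (izq + PySem.Int.floordiv (der - izq) 2 + 1).toNat = i + ((n - 1) / 2 + 1) := by
              rw [hmid]; omega
            rw [h3, h4, ← hs, List.drop_take, List.drop_drop]
            congr 1
            omega
    · rw [Busqueda_Binaria_Secuencia_go, if_neg hge]
      have hn0 : (der + 1 - izq).toNat = 0 := by omega
      rw [hn0]
      simp [pvBusca]

theorem busqueda_eq_busca (palabra : String × Int) (db : List (String × List Int)) :
    Busqueda_Binaria_Secuencia palabra db 0 ((db.length : Int) - 1) = pvBusca palabra.1 db := by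
  have h := go_eq_busca palabra db ((db.length : Int) - 1 - 0 + 1).toNat 0 ((db.length : Int) - 1)
    (by omega) (by omega) (by omega)
  rw [Busqueda_Binaria_Secuencia, h]
  congr 1
  simp

-- A's foldl over the query, started from any accumulator, is that accumulator followed by B's flatMap.
theorem foldl_eq_flatMap (db : List (String × List Int)) :
    ∀ (q : List (String × Int)) (acc : List (List Int)),
      q.foldl
        (fun lista palabra =>
          let m := Busqueda_Binaria_Secuencia palabra db 0 ((db.length : Int) - 1)
          if m ≠ [] then m.foldl (fun a i => a ++ [[palabra.2, i]]) lista else lista) acc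
      = acc ++ q.flatMap (fun p => (pvBusca p.1 db).map (fun i => [p.2, i])) := by
  intro q
  induction q with
  | nil => intro acc; simp
  | cons p rest ih =>
      intro acc
      simp only [List.foldl_cons, List.flatMap_cons]
      rw [ih]
      by_cases hm : Busqueda_Binaria_Secuencia p db 0 ((db.length : Int) - 1) = []
      · simp [hm, ← busqueda_eq_busca]
      · simp only [hm, ne_eq, not_false_eq_true, if_pos,
          PySem.List.foldl_append_singleton_eq_map, ← busqueda_eq_busca, List.append_assoc]

-- ===== VERDICT (by name: the statement is the Claim_ definition above) =====
theorem Encontrar_Pares_HSSP_spec : Claim_equal_Encontrar_Pares_HSSP := by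
  intro q db _
  show _ = _
  rw [Encontrar_Pares_HSSP, Encontrar_Pares_HSSP_alt, foldl_eq_flatMap db q [], List.nil_append]
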